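-- pv_equiv track=rewrite | github.com/miliar/Code_Jam_Webscraper | solutions_python/Problem_96/1727.py | PossibleScores
-- ===== SOURCE A (Python) =====
-- import math
--
-- def PossibleScores(score):
--     scores = []
--
--     for i in range(11):
--         for j in range(11):
--             for k in range(11):
--                 newscore = [i, j, k]
--                 newscore.sort()
--
--                 # Check if all numbers are within the desired range
--                 if math.fabs(newscore[0] - newscore[2]) <= 2 and (i + j + k) == score:
--
--                     if (newscore in scores) == False:
--                         scores.append(newscore)
--
--     return scores
-- ===== SOURCE B (Python) =====
-- def PossibleScores(score):
--     # For each (a, b) with a <= b <= min(a+2, 10), the third die is forced: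
--     # c = score - a - b; keep the triple iff b <= c <= min(a+2, 10).
--     return [[a, b, score - a - b]
--             for a in range(11)
--             for b in range(a, min(a + 2, 10) + 1)
--             if b <= score - a - b <= min(a + 2, 10)]
-- ===== Notes on version B (the rewrite author's own statement) =====
-- stated objective: faster
-- what changed: Computes the third die in closed form (c = score - a - b) inside a two-level comprehension over (a, b) with the spread bound built into b's range, eliminating A's third loop, the per-triple sort and the quadratic membership dedup.
import Mathlib
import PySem

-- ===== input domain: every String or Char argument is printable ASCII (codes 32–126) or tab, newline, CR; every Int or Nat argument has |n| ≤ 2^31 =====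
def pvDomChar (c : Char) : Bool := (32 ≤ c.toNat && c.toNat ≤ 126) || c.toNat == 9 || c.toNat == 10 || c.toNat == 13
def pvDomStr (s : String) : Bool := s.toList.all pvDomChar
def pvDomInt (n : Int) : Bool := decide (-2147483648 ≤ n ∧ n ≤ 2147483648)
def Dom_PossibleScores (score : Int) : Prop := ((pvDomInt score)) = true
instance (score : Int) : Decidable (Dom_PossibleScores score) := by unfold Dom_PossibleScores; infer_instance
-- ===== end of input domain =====

-- B computes the third die in closed form inside a two-level comprehension over (a, b),
-- dropping A's third loop, per-triple sort and membership dedup (objective: faster by a constant factor).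

-- ===== PORT A =====
-- math.fabs(x) <= 2 on the small integers occurring here is exactly |x| <= 2 (floats are exact there).
def PossibleScores (score : Int) : List (List Int) :=
  (PySem.List.pyRange 0 11 1).foldl (fun scores i =>
    (PySem.List.pyRange 0 11 1).foldl (fun scores j =>
      (PySem.List.pyRange 0 11 1).foldl (fun scores k =>
        let newscore := PySem.List.sorted [i, j, k] (fun x => x) false
        if |newscore.getD 0 0 - newscore.getD 2 0| ≤ 2 ∧ i + j + k = score then
          if scores.contains newscore = false then scores ++ [newscore] else scores
        else scores) scores) scores) []

-- ===== PORT B =====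
-- Source B is a comprehension: flatMap over a, filterMap over b with the forced c = score - a - b.
def PossibleScores_alt (score : Int) : List (List Int) :=
  (PySem.List.pyRange 0 11 1).flatMap (fun a =>
    (PySem.List.pyRange a (min (a + 2) 10 + 1) 1).filterMap (fun b =>
      if b ≤ score - a - b ∧ score - a - b ≤ min (a + 2) 10 then
        some [a, b, score - a - b]
      else none))

-- ===== PRECONDITION & SPEC =====
def Spec_PossibleScores (score : Int) (out : List (List Int)) : Prop := out = PossibleScores_alt score
instance (score : Int) (out : List (List Int)) : Decidable (Spec_PossibleScores score out) := by unfold Spec_PossibleScores; infer_instance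

-- ===== CLAIM (what is proved, stated in full; the proofs are below) =====
def Claim_equal_PossibleScores : Prop := ∀ (score : Int), Dom_PossibleScores score → Spec_PossibleScores score (PossibleScores score)

-- ===== LEMMAS AND PROOFS =====

theorem pv_foldl_id {α β : Type} (l : List β) (f : α → β → α) (acc : α)
    (h : ∀ a x, x ∈ l → f a x = a) : l.foldl f acc = acc := by
  induction l generalizing acc with
  | nil => rfl
  | cons x xs ih =>
    simp only [List.foldl_cons, h acc x (List.mem_cons_self)]
    exact ih _ (fun a y hy => h a y (List.mem_cons_of_mem _ hy))

-- A returns [] when score is outside [0, 30]: the sum condition never holds.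
theorem pv_A_empty (score : Int) (h : score < 0 ∨ 30 < score) : PossibleScores score = [] := by
  unfold PossibleScores
  apply pv_foldl_id; intro a i hi
  apply pv_foldl_id; intro a' j hj
  apply pv_foldl_id; intro a'' k hk
  rw [PySem.List.mem_pyRange_one] at hi hj hk
  rw [if_neg]; rintro ⟨-, hs⟩; omega

-- B returns [] when score is outside [0, 30]: the forced c check never holds.
theorem pv_B_empty (score : Int) (h : score < 0 ∨ 30 < score) : PossibleScores_alt score = [] := by
  unfold PossibleScores_alt
  rw [List.flatMap_eq_nil_iff]
  intro a ha
  rw [List.filterMap_eq_nil_iff]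
  intro b hb
  rw [PySem.List.mem_pyRange_one] at ha hb
  rw [if_neg]; rintro ⟨h1, h2⟩; omega

-- ===== VERDICT (by name: the statement is the Claim_ definition above) =====
set_option maxRecDepth 100000 in
theorem PossibleScores_spec : Claim_equal_PossibleScores := by
  intro score _
  unfold Spec_PossibleScores
  by_cases hlo : 0 ≤ score
  · by_cases hhi : score ≤ 30
    · interval_cases score <;> decide
    · rw [pv_A_empty score (Or.inr (by omega)), pv_B_empty score (Or.inr (by omega))]
  · rw [pv_A_empty score (Or.inl (by omega)), pv_B_empty score (Or.inl (by omega))]
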